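-- pv_equiv track=rewrite | github.com/Lakyn80/ai-legal-system | backend/scripts/forensic_compare_ru_reconstruction.py | overlap_merge
-- ===== SOURCE A (Python) =====
-- def overlap_merge(base: str, nxt: str, max_overlap: int = 600) -> str:
--     if not base:
--         return nxt
--     if not nxt:
--         return base
--     b = base.rstrip()
--     n = nxt.lstrip()
--     max_k = min(len(b), len(n), max_overlap)
--     overlap = 0
--     for k in range(max_k, 24, -1):
--         if b[-k:] == n[:k]:
--             overlap = k
--             break
--     if overlap:
--         return b + n[overlap:]
--     return b + "\n\n" + n
-- ===== SOURCE B (Python) =====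
-- def overlap_merge(base: str, nxt: str, max_overlap: int = 600) -> str:
--     if not base:
--         return nxt
--     if not nxt:
--         return base
--     b = base.rstrip()
--     n = nxt.lstrip()
--     max_k = min(len(b), len(n), max_overlap)
--     overlap = 0
--     if max_k > 24:
--         anchor = n[:25]
--         p = b.find(anchor, len(b) - max_k)
--         while p != -1:
--             if n.startswith(b[p:]):
--                 overlap = len(b) - p
--                 break
--             p = b.find(anchor, p + 1)
--     if overlap:
--         return b + n[overlap:]
--     return b + "\n\n" + n
-- ===== Notes on version B (the rewrite author's own statement) =====
-- stated objective: faster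
-- what changed: A scans every candidate overlap length k downward comparing b[-k:] to n[:k]; B instead anchors on the first 25 characters of the stripped next chunk and uses C-level str.find to jump directly between occurrences of that anchor in the base, verifying a full match only at those positions.
import Mathlib
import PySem

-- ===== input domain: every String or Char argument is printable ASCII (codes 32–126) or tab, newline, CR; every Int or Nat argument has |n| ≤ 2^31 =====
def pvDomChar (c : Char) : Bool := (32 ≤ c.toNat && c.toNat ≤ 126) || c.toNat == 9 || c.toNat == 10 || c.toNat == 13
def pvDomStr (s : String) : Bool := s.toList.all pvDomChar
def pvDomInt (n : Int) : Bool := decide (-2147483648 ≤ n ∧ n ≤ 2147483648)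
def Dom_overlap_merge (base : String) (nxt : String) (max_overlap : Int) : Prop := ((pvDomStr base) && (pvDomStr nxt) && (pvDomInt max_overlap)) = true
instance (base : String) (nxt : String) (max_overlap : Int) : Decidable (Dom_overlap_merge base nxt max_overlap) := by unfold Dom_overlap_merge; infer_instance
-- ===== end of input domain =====

-- B replaces A's downward scan over all candidate overlap lengths by an anchored substring
-- search: it finds occurrences of the first 25 characters of the stripped next chunk inside
-- the stripped base (left to right) and takes the first full match (objective: faster, as measured).

-- ===== PORT A =====
def overlap_merge (base : String) (nxt : String) (max_overlap : Int) : String :=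
  if base.toList = [] then nxt
  else if nxt.toList = [] then base
  else
    let b := PySem.Chars.rstrip base.toList
    let n := PySem.Chars.lstrip nxt.toList
    let max_k : Int := min (min (PySem.Chars.len b) (PySem.Chars.len n)) max_overlap
    -- for k in range(max_k, 24, -1): if b[-k:] == n[:k]: overlap = k; break
    let overlap : Int :=
      (PySem.List.pyRange max_k 24 (-1)).foldl
        (fun acc k =>
          if acc ≠ 0 then acc
          else if PySem.List.slice b (some (-k)) none = PySem.List.slice n none (some k) then k
          else acc)
        0
    if overlap ≠ 0 then String.ofList (b ++ PySem.List.slice n (some overlap) none)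
    else String.ofList (b ++ ('\n' :: '\n' :: n))

-- ===== PORT B =====
-- while p != -1: if n.startswith(b[p:]): overlap = len(b)-p; break; p = b.find(anchor, p+1)
-- (fuel b.length + 1 is only a totality guard; the loop's p strictly increases)
def pvAltLoop (b n anchor : List Char) (start : Int) : Nat → Int
  | 0 => 0
  | Nat.succ fuel =>
      let p := PySem.Chars.findFrom b anchor start
      if p = -1 then 0
      else if PySem.Chars.startswith n (PySem.List.slice b (some p) none) then
        PySem.Chars.len b - p
      else pvAltLoop b n anchor (p + 1) fuel

def overlap_merge_alt (base : String) (nxt : String) (max_overlap : Int) : String :=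
  if base.toList = [] then nxt
  else if nxt.toList = [] then base
  else
    let b := PySem.Chars.rstrip base.toList
    let n := PySem.Chars.lstrip nxt.toList
    let max_k : Int := min (min (PySem.Chars.len b) (PySem.Chars.len n)) max_overlap
    let overlap : Int :=
      if 24 < max_k then
        let anchor := PySem.List.slice n none (some 25)
        pvAltLoop b n anchor (PySem.Chars.len b - max_k) (b.length + 1)
      else 0
    if overlap ≠ 0 then String.ofList (b ++ PySem.List.slice n (some overlap) none)
    else String.ofList (b ++ ('\n' :: '\n' :: n))

-- ===== PRECONDITION & SPEC =====
def Spec_overlap_merge (base : String) (nxt : String) (max_overlap : Int) (out : String) : Prop := out = overlap_merge_alt base nxt max_overlap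
instance (base : String) (nxt : String) (max_overlap : Int) (out : String) : Decidable (Spec_overlap_merge base nxt max_overlap out) := by unfold Spec_overlap_merge; infer_instance

-- ===== CLAIM (what is proved, stated in full; the proofs are below) =====
def Claim_equal_overlap_merge : Prop := ∀ (base : String) (nxt : String) (max_overlap : Int), Dom_overlap_merge base nxt max_overlap → Spec_overlap_merge base nxt max_overlap (overlap_merge base nxt max_overlap)

-- ===== LEMMAS AND PROOFS =====

-- `b[p:]` is a full match: the rest of the base is a prefix of the next chunk
def pvFull (b n : List Char) (p : Nat) : Bool := decide (List.drop p b <+: n)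
-- what B's loop tests at an anchor position
def pvQ (b n : List Char) (p : Nat) : Bool := decide (List.take 25 n <+: List.drop p b) && pvFull b n p

def pvStep (b n : List Char) (acc k : Int) : Int :=
  if acc ≠ 0 then acc
  else if PySem.List.slice b (some (-k)) none = PySem.List.slice n none (some k) then k
  else acc

def pvCond (b n : List Char) (k : Int) : Bool :=
  decide (PySem.List.slice b (some (-k)) none = PySem.List.slice n none (some k))

lemma pvFoldl_keep (b n : List Char) (L : List Int) (acc : Int) (h : acc ≠ 0) :
    L.foldl (pvStep b n) acc = acc := by
  induction L with
  | nil => rfl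
  | cons x L ih => simpa [pvStep, h] using ih

lemma pvFoldl_find (b n : List Char) (L : List Int) (h : ∀ k ∈ L, k ≠ 0) :
    L.foldl (pvStep b n) 0 = (L.find? (pvCond b n)).getD 0 := by
  induction L with
  | nil => rfl
  | cons x L ih =>
    rw [List.foldl_cons]
    by_cases hx : PySem.List.slice b (some (-x)) none = PySem.List.slice n none (some x)
    · have hx0 : x ≠ 0 := h x (by simp)
      rw [show pvStep b n 0 x = x by simp [pvStep, hx], pvFoldl_keep b n L x hx0,
        List.find?_cons_of_pos (by simp [pvCond, hx])]
      rfl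
    · rw [show pvStep b n 0 x = 0 by simp [pvStep, hx],
        List.find?_cons_of_neg (by simp [pvCond, hx])]
      exact ih (fun k hk => h k (by simp [hk]))

lemma pvFind?_congr {α : Type} (p q : α → Bool) (l : List α) (h : ∀ x ∈ l, p x = q x) :
    l.find? p = l.find? q := by
  induction l with
  | nil => rfl
  | cons x l ih =>
    have hx := h x (by simp)
    by_cases hp : p x = true
    · rw [List.find?_cons_of_pos hp, List.find?_cons_of_pos (hx ▸ hp)]
    · rw [List.find?_cons_of_neg hp, List.find?_cons_of_neg (by rw [← hx]; exact hp)]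
      exact ih (fun y hy => h y (by simp [hy]))

lemma pvFind?_range'_eq_some (p : Nat → Bool) (s n x : Nat) (hx1 : s ≤ x) (hx2 : x < s + n)
    (hpx : p x = true) (hmin : ∀ i, s ≤ i → i < x → p i = false) :
    (List.range' s n).find? p = some x := by
  induction n generalizing s with
  | zero => omega
  | succ n ih =>
    rw [List.range'_succ]
    by_cases hsx : s = x
    · subst hsx; rw [List.find?_cons_of_pos hpx]
    · rw [List.find?_cons_of_neg (by simp [hmin s le_rfl (by omega)])]
      exact ih (s + 1) (by omega) (by omega) (fun i h1 h2 => hmin i (by omega) h2)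

lemma pvFind?_range'_skip (p : Nat → Bool) (s t E : Nat) (hst : s ≤ t) (htE : t ≤ E + 1)
    (h : ∀ i, s ≤ i → i < t → p i = false) :
    (List.range' s (E + 1 - s)).find? p = (List.range' t (E + 1 - t)).find? p := by
  have hsplit : List.range' s (t - s) ++ List.range' t (E + 1 - t) = List.range' s (E + 1 - s) := by
    have h0 := List.range'_append (s := s) (m := t - s) (n := E + 1 - t) (step := 1)
    rw [show s + 1 * (t - s) = t by omega] at h0
    rw [h0]; congr 1; omega
  rw [← hsplit, List.find?_append]
  have hnone : (List.range' s (t - s)).find? p = none := by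
    rw [List.find?_eq_none]
    intro x hx
    rw [List.mem_range'_1] at hx
    simp [h x hx.1 (by omega)]
  simp [hnone]

-- main characterization of B's loop: it returns the first full-match position at or
-- after `start`, as an overlap length, or 0 if there is none
lemma pvLoop_eq (b n : List Char) (h25 : 25 ≤ n.length) :
    ∀ (fuel start : Nat), start ≤ b.length → b.length + 1 - start ≤ fuel →
    pvAltLoop b n (List.take 25 n) (start : Int) fuel =
      (match (List.range' start (b.length + 1 - start)).find? (pvQ b n) with
       | some p => ((b.length - p : Nat) : Int)
       | none => 0) := by
  intro fuel
  induction fuel with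
  | zero => intro start hs hf; omega
  | succ fuel ih =>
    intro start hs hf
    simp only [pvAltLoop]
    by_cases hF : PySem.Chars.findFrom b (List.take 25 n) (start : Int) = -1
    · rw [if_pos hF]
      have hno : ¬ List.take 25 n <:+: List.drop start b :=
        (PySem.Chars.findFrom_natCast_eq_neg_one_iff b _ start hs).mp hF
      have hnone : (List.range' start (b.length + 1 - start)).find? (pvQ b n) = none := by
        rw [List.find?_eq_none]
        intro x hx
        rw [List.mem_range'_1] at hx
        have hanch : ¬ List.take 25 n <+: List.drop x b := by
          intro hc
          apply hno
          have hdd : List.drop x b = List.drop (x - start) (List.drop start b) := by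
            rw [List.drop_drop]; congr 1; omega
          rw [hdd] at hc
          exact hc.isInfix.trans (List.drop_suffix (x - start) (List.drop start b)).isInfix
        simp [pvQ, hanch]
      rw [hnone]
    · rw [if_neg hF]
      obtain ⟨h1, h2, h3⟩ := PySem.Chars.findFrom_natCast_spec b (List.take 25 n) start hs hF
      have hF0 : (0 : Int) ≤ PySem.Chars.findFrom b (List.take 25 n) (start : Int) :=
        le_trans (by omega) h1
      set F := PySem.Chars.findFrom b (List.take 25 n) (start : Int) with hFdef
      have hFp : F = ((F.toNat : Nat) : Int) := (Int.toNat_of_nonneg hF0).symm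
      have hsp : start ≤ F.toNat := by omega
      have hal : (List.take 25 n).length = 25 := by simp; omega
      have h2len : 25 ≤ (List.drop F.toNat b).length := hal ▸ h2.length_le
      have hpFle : F.toNat + 25 ≤ b.length := by
        rw [List.length_drop] at h2len; omega
      rw [PySem.List.slice_from b hF0]
      by_cases hsw : PySem.Chars.startswith n (List.drop F.toNat b) = true
      · rw [if_pos hsw]
        have hfull : List.drop F.toNat b <+: n := (PySem.Chars.startswith_iff n _).mp hsw
        have hfind : (List.range' start (b.length + 1 - start)).find? (pvQ b n) = some F.toNat :=
          pvFind?_range'_eq_some _ start _ F.toNat hsp (by omega)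
            (by simp [pvQ, pvFull, h2, hfull])
            (fun i hi1 hi2 => by simp [pvQ, h3 i hi1 hi2])
        rw [hfind]
        show PySem.Chars.len b - F = ((b.length - F.toNat : Nat) : Int)
        simp only [PySem.Chars.len_eq]
        omega
      · rw [if_neg hsw]
        have hfull' : ¬ List.drop F.toNat b <+: n :=
          fun hc => hsw ((PySem.Chars.startswith_iff n _).mpr hc)
        have hstep : F + 1 = ((F.toNat + 1 : Nat) : Int) := by omega
        rw [hstep, ih (F.toNat + 1) (by omega) (by omega)]
        have hskip := pvFind?_range'_skip (pvQ b n) start (F.toNat + 1) b.length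
          (by omega) (by omega)
          (fun i hi1 hi2 => by
            by_cases hi : i < F.toNat
            · simp [pvQ, h3 i hi1 hi]
            · have : i = F.toNat := by omega
              subst this
              simp [pvQ, pvFull, hfull'])
        rw [hskip]

-- the pointwise bridge between A's test on k and B's test on p = len(b) - k
lemma pvCond_eq_pvQ (b n : List Char) (m j : Nat) (hmb : m ≤ b.length)
    (hj : j < m - 24) :
    pvCond b n ((m : Int) - (j : Int)) = pvQ b n (b.length - m + j) := by
  have hk1 : (m : Int) - (j : Int) = ((m - j : Nat) : Int) := by omega
  have hk0 : 0 < m - j := by omega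
  have hbk : b.length - (m - j) = b.length - m + j := by omega
  have ht : (List.drop (b.length - m + j) b).length = m - j := by
    rw [List.length_drop]; omega
  rw [pvCond, hk1, PySem.List.slice_from_neg_natCast b (m - j) hk0,
    PySem.List.slice_to_natCast, hbk, pvQ, pvFull, ← Bool.decide_and]
  apply decide_eq_decide.mpr
  constructor
  · intro h
    constructor
    · rw [h]
      have h25 : List.take 25 n = List.take 25 (List.take (m - j) n) := by
        rw [List.take_take]; congr 1; omega
      rw [h25]
      exact List.take_prefix _ _
    · rw [h]
      exact List.take_prefix _ _
  · rintro ⟨-, h2⟩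
    have := List.prefix_iff_eq_take.mp h2
    rwa [ht] at this

-- A's overlap computation equals B's overlap computation
lemma pvMain (b n : List Char) (mo : Int) :
    (PySem.List.pyRange (min (min (PySem.Chars.len b) (PySem.Chars.len n)) mo) 24 (-1)).foldl
        (fun acc k =>
          if acc ≠ 0 then acc
          else if PySem.List.slice b (some (-k)) none = PySem.List.slice n none (some k) then k
          else acc) 0 =
      (if 24 < min (min (PySem.Chars.len b) (PySem.Chars.len n)) mo then
        pvAltLoop b n (PySem.List.slice n none (some 25))
          (PySem.Chars.len b - min (min (PySem.Chars.len b) (PySem.Chars.len n)) mo)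
          (b.length + 1)
      else 0) := by
  show List.foldl (pvStep b n) 0 _ = _
  have hlb := PySem.Chars.len_eq b
  have hln := PySem.Chars.len_eq n
  set mk := min (min (PySem.Chars.len b) (PySem.Chars.len n)) mo with hmk
  have hmkb : mk ≤ (b.length : Int) := by
    rw [hmk, ← hlb]; exact le_trans (min_le_left _ _) (min_le_left _ _)
  have hmkn : mk ≤ (n.length : Int) := by
    rw [hmk, ← hln]; exact le_trans (min_le_left _ _) (min_le_right _ _)
  by_cases h24 : 24 < mk
  · rw [if_pos h24]
    set m := mk.toNat with hm
    have hmki : mk = (m : Int) := by omega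
    have h25m : 25 ≤ m := by omega
    have hmb : m ≤ b.length := by omega
    have hmn : m ≤ n.length := by omega
    rw [pvFoldl_find b n _ (fun k hk => by rw [PySem.List.mem_pyRange_neg_one] at hk; omega)]
    rw [PySem.List.pyRange_neg_one]
    have hcnt : (mk - 24).toNat = m - 24 := by omega
    rw [hcnt, List.find?_map]
    have han : PySem.List.slice n none (some 25) = List.take 25 n := by
      rw [PySem.List.slice_to n (by norm_num)]
      simp
    have hstart : PySem.Chars.len b - mk = ((b.length - m : Nat) : Int) := by omega
    rw [han, hstart, pvLoop_eq b n (by omega) (b.length + 1) (b.length - m) (by omega) (by omega)]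
    rw [List.range'_eq_map_range, List.find?_map]
    have hcnt2 : b.length + 1 - (b.length - m) = (m - 24) + 25 := by omega
    rw [hcnt2, List.range_add, List.find?_append]
    have htail : List.find? (pvQ b n ∘ fun x => b.length - m + x)
        (List.map (fun x => m - 24 + x) (List.range 25)) = none := by
      rw [List.find?_eq_none]
      intro x hx
      simp only [List.mem_map, List.mem_range] at hx
      obtain ⟨j, hj, rfl⟩ := hx
      have hanch : ¬ List.take 25 n <+: List.drop (b.length - m + (m - 24 + j)) b := by
        intro hc
        have hl := hc.length_le
        rw [List.length_take, List.length_drop] at hl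
        omega
      simp [pvQ, hanch]
    rw [htail, Option.or_none]
    rw [pvFind?_congr (pvCond b n ∘ fun (k : Nat) => mk - (k : Int))
      (pvQ b n ∘ fun (x : Nat) => b.length - m + x) (List.range (m - 24))
      (fun j hj => by
        simp only [Function.comp_apply]
        rw [List.mem_range] at hj
        rw [hmki]
        exact pvCond_eq_pvQ b n m j hmb hj)]
    cases hfo : List.find? (pvQ b n ∘ fun (x : Nat) => b.length - m + x) (List.range (m - 24)) with
    | none => rfl
    | some j =>
      have hjm : j < m - 24 := by
        have := List.mem_of_find?_eq_some hfo
        rwa [List.mem_range] at this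
      simp only [Option.map_some, Option.getD_some]
      show mk - (j : Int) = ((b.length - (b.length - m + j) : Nat) : Int)
      omega
  · rw [if_neg h24, PySem.List.pyRange_neg_one_eq_nil (by omega)]
    rfl

-- ===== VERDICT (by name: the statement is the Claim_ definition above) =====
theorem overlap_merge_spec : Claim_equal_overlap_merge := by
  intro base nxt max_overlap _
  unfold Spec_overlap_merge overlap_merge overlap_merge_alt
  by_cases h1 : base.toList = []
  · simp [h1]
  · by_cases h2 : nxt.toList = []
    · simp [h1, h2]
    · simp only [if_neg h1, if_neg h2]
      rw [pvMain]
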